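-- pv_equiv track=rewrite | github.com/maghams62/auto_mac | src/agent/evidence_retrievers.py | _extract_token
-- ===== SOURCE A (Python) =====
-- from typing import Any, Dict, List, Optional, Tuple
--
-- def _extract_token(query: str, prefix: str) -> Optional[str]:
--     if not query:
--         return None
--     lowered = query.lower()
--     prefix_lower = prefix.lower()
--     for token in lowered.replace(",", " ").split():
--         token = token.strip()
--         if token.startswith(prefix_lower):
--             return token[len(prefix_lower):].strip()
--     return None
-- ===== SOURCE B (Python) =====
-- def _is_sep(ch: str) -> bool:
--     return ch.isspace() or ch == ","
--
--
-- def _extract_token(query, prefix):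
--     # Single character-level scan: no replace(), no token list is built.
--     if not query:
--         return None
--     s = query.lower()
--     p = prefix.lower()
--     n = len(s)
--     i = 0
--     while i < n:
--         if _is_sep(s[i]):
--             i += 1
--             continue
--         j = i + 1
--         while j < n and not _is_sep(s[j]):
--             j += 1
--         tok = s[i:j]
--         if tok.startswith(p):
--             return tok[len(p):]
--         i = j
--     return None
-- ===== Notes on version B (the rewrite author's own statement) =====
-- stated objective: alternative
-- what changed: Replaced A's replace-comma-then-split-then-token-loop with a single character-level scanner that walks the lowered string once, skipping separators (whitespace or comma) and checking the prefix at each token start, building no intermediate replaced string or token list.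
import Mathlib
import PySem

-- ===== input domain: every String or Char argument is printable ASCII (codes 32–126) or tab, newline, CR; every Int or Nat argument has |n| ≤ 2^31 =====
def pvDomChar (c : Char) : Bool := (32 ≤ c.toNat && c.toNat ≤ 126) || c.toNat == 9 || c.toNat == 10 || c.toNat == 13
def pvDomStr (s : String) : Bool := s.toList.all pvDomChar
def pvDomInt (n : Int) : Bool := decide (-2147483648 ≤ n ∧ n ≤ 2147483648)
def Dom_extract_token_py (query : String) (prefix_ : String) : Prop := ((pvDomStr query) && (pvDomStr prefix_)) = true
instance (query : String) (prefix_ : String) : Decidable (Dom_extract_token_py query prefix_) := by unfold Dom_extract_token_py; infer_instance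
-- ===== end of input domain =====

-- B replaces A's replace-comma / split / token-loop pipeline by a single character-level
-- scanner over the lowered string (objective: alternative, same O(n) cost).


-- ===== PORT A =====
-- the `for token in …:` loop of A
def extractLoopA (pl : String) : List String → Option String
  | [] => none
  | t :: ts =>
    if PySem.Str.startswith (PySem.Str.strip t) pl then
      some (PySem.Str.strip (PySem.Str.slice (PySem.Str.strip t) (some (PySem.Str.len pl)) none))
    else extractLoopA pl ts

def extract_token_py (query : String) (prefix_ : String) : Option String :=
  if query = "" then none
  else
    extractLoopA (PySem.Str.lower prefix_)
      (PySem.Str.split₀ (PySem.Str.replace (PySem.Str.lower query) "," " "))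

-- ===== PORT B =====
-- Source B's `_is_sep`
def pvIsSep (c : Char) : Bool := PySem.Chars.isspace c || c == ','

-- Source B's while-loop: skip separators; at a token start take the token
-- (the inner `while j < n` advance), test the prefix, else continue past it
def pvScanB (p : List Char) : List Char → Option String
  | [] => none
  | c :: rest =>
    if pvIsSep c then pvScanB p rest
    else
      if p.isPrefixOf (c :: rest.takeWhile (fun x => !pvIsSep x)) then
        some (String.ofList (List.drop p.length (c :: rest.takeWhile (fun x => !pvIsSep x))))
      else pvScanB p (rest.dropWhile (fun x => !pvIsSep x))
termination_by s => s.length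
decreasing_by
  · simp
  · have := List.length_dropWhile_le (fun x => !pvIsSep x) rest
    simp; omega

def extract_token_py_alt (query : String) (prefix_ : String) : Option String :=
  if query = "" then none
  else pvScanB (PySem.Chars.lower prefix_.toList) (PySem.Chars.lower query.toList)

-- ===== PRECONDITION & SPEC =====
def Spec_extract_token_py (query : String) (prefix_ : String) (out : Option String) : Prop := out = extract_token_py_alt query prefix_
instance (query : String) (prefix_ : String) (out : Option String) : Decidable (Spec_extract_token_py query prefix_ out) := by unfold Spec_extract_token_py; infer_instance

-- ===== CLAIM (what is proved, stated in full; the proofs are below) =====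
def Claim_equal_extract_token_py : Prop := ∀ (query : String) (prefix_ : String), Dom_extract_token_py query prefix_ → Spec_extract_token_py query prefix_ (extract_token_py query prefix_)

-- ===== LEMMAS AND PROOFS =====
-- `lowered.replace("," , " ")` maps ',' to ' ' pointwise
def pvCommaF (c : Char) : Char := if c = ',' then ' ' else c

lemma pv_replaceGo (fuel : Nat) : ∀ (l : List Char) (acc : List Char), l.length ≤ fuel →
    PySem.Chars.replace.go [','] [' '] fuel l acc = acc.reverse ++ l.map pvCommaF := by
  induction fuel with
  | zero =>
    intro l acc h
    have hl : l = [] := List.eq_nil_of_length_eq_zero (Nat.le_zero.mp h)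
    subst hl
    simp [PySem.Chars.replace.go]
  | succ n ih =>
    intro l acc h
    cases l with
    | nil => simp [PySem.Chars.replace.go]
    | cons c t =>
      simp only [PySem.Chars.replace.go, List.isPrefixOf, Bool.and_true]
      by_cases hc : c = ','
      · subst hc
        simp only [beq_self_eq_true, if_pos]
        rw [ih _ _ (by simpa using Nat.le_of_succ_le_succ h)]
        norm_num [pvCommaF]
      · rw [if_neg (by simp only [beq_iff_eq]; exact Ne.symm hc)]
        rw [ih _ _ (Nat.le_of_succ_le_succ h)]
        have h2 : pvCommaF c = c := by simp [pvCommaF, hc]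
        simp [h2]

lemma pv_replace_comma (s : List Char) :
    PySem.Chars.replace s [','] [' '] = s.map pvCommaF := by
  rw [PySem.Chars.replace]
  rw [if_neg (by simp)]
  simpa using pv_replaceGo s.length s [] le_rfl

-- the canonical "words" recursion computed by split()
def pvWords : List Char → List (List Char)
  | [] => []
  | c :: s =>
    if PySem.Chars.isspace c then pvWords s
    else (c :: s.takeWhile (fun x => !PySem.Chars.isspace x)) :: pvWords (s.dropWhile (fun x => !PySem.Chars.isspace x))
termination_by s => s.length
decreasing_by
  · simp
  · have := List.length_dropWhile_le (fun x => !PySem.Chars.isspace x) s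
    simp; omega

lemma pv_goSpec : ∀ (s cur : List Char) (acc : List (List Char)),
    PySem.Chars.split₀.go s cur acc = acc.reverse ++
      (if cur.isEmpty then pvWords s
       else (cur.reverse ++ s.takeWhile (fun x => !PySem.Chars.isspace x)) ::
            pvWords (s.dropWhile (fun x => !PySem.Chars.isspace x))) := by
  intro s
  induction s with
  | nil =>
    intro cur acc
    cases cur <;> simp [PySem.Chars.split₀.go, pvWords]
  | cons c rest ih =>
    intro cur acc
    by_cases hsp : PySem.Chars.isspace c
    · cases cur with
      | nil => simp [PySem.Chars.split₀.go, hsp, ih, pvWords]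
      | cons a b =>
        simp only [PySem.Chars.split₀.go, hsp, if_pos, List.isEmpty_cons, Bool.false_eq_true,
          if_false, ih]
        simp [pvWords, hsp, List.takeWhile_cons, List.dropWhile_cons]
    · simp only [PySem.Chars.split₀.go, hsp, Bool.false_eq_true, if_false, ih]
      cases cur <;>
        simp [pvWords, hsp, List.takeWhile_cons, List.dropWhile_cons]

lemma pv_split₀_eq_words (s : List Char) : PySem.Chars.split₀ s = pvWords s := by
  rw [PySem.Chars.split₀]
  simpa using pv_goSpec s [] []

lemma pv_dropWhile_all_false {α : Type} {p : α → Bool} {l : List α}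
    (h : ∀ x ∈ l, p x = false) : l.dropWhile p = l := by
  cases l with
  | nil => rfl
  | cons a t => simp [List.dropWhile_cons, h a (by simp)]

lemma pv_strip_nonspace {t : List Char}
    (h : ∀ x ∈ t, PySem.Chars.isspace x = false) : PySem.Chars.strip t = t := by
  rw [PySem.Chars.strip, PySem.Chars.lstrip, PySem.Chars.rstrip]
  rw [pv_dropWhile_all_false h]
  rw [pv_dropWhile_all_false (by intro x hx; exact h x (by simpa using hx))]
  simp

-- Chars-level version of A's token loop
def pvLoopC (pl : List Char) : List (List Char) → Option String
  | [] => none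
  | t :: ts =>
    if pl.isPrefixOf (PySem.Chars.strip t) then
      some (String.ofList (PySem.Chars.strip (List.drop pl.length (PySem.Chars.strip t))))
    else pvLoopC pl ts

lemma pv_loopA_eq_loopC (pl : String) (ts : List String) :
    extractLoopA pl ts = pvLoopC pl.toList (ts.map String.toList) := by
  induction ts with
  | nil => rfl
  | cons t ts ih =>
    rw [extractLoopA, List.map_cons, pvLoopC, ih]
    rw [PySem.Str.startswith_eq, PySem.Str.toList_strip]
    rw [show PySem.Chars.startswith (PySem.Chars.strip t.toList) pl.toList
        = pl.toList.isPrefixOf (PySem.Chars.strip t.toList) from rfl]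
    split_ifs with h
    · simp only [Option.some.injEq]
      rw [← String.toList_inj, String.toList_ofList]
      rw [PySem.Str.toList_strip, PySem.Str.toList_slice, PySem.Chars.slice_eq_listSlice]
      rw [PySem.Str.toList_strip]
      rw [show PySem.Str.len pl = (pl.toList.length : Int) from PySem.Str.len_eq pl]
      rw [PySem.List.slice_from _ (by exact_mod_cast Nat.zero_le _)]
      simp
    · rfl

lemma pv_isspace_commaF (x : Char) : PySem.Chars.isspace (pvCommaF x) = pvIsSep x := by
  unfold pvCommaF pvIsSep
  by_cases hx : x = ','
  · subst hx; simp; decide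
  · simp [hx]

lemma pv_nonsep_nonspace {x : Char} (h : pvIsSep x = false) :
    PySem.Chars.isspace x = false := by
  unfold pvIsSep at h
  exact (Bool.or_eq_false_iff.mp h).1

lemma pv_scan_eq (pl : List Char) : ∀ (s : List Char),
    pvScanB pl s = pvLoopC pl (pvWords (s.map pvCommaF)) := by
  intro s
  induction hn : s.length using Nat.strong_induction_on generalizing s with
  | _ n ih =>
  cases s with
  | nil => simp [pvScanB, pvWords, pvLoopC]
  | cons c rest =>
    subst hn
    by_cases hc : pvIsSep c
    · rw [pvScanB]
      simp only [hc, if_pos]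
      rw [List.map_cons, pvWords]
      rw [if_pos (by rw [pv_isspace_commaF]; exact hc)]
      exact ih rest.length (by simp) rest rfl
    · have hcb : pvIsSep c = false := by simpa using hc
      have hcs : pvCommaF c = c := by
        unfold pvCommaF
        have hne : c ≠ ',' := by
          intro h'; rw [h'] at hcb; unfold pvIsSep at hcb; simp at hcb
        simp [hne]
      have hfe : ((fun x => !PySem.Chars.isspace x) ∘ pvCommaF) = (fun x => !pvIsSep x) := by
        funext x; simp [Function.comp, pv_isspace_commaF]
      have htk : (rest.map pvCommaF).takeWhile (fun x => !PySem.Chars.isspace x)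
          = rest.takeWhile (fun x => !pvIsSep x) := by
        rw [List.takeWhile_map, hfe]
        apply (List.map_congr_left ?_).trans (List.map_id _)
        intro a ha
        have hsep : pvIsSep a = false := by
          have := List.mem_takeWhile_imp ha; simpa using this
        have hne : a ≠ ',' := by
          intro h'; rw [h'] at hsep; unfold pvIsSep at hsep; simp at hsep
        simp [pvCommaF, hne]
      have hdw : (rest.map pvCommaF).dropWhile (fun x => !PySem.Chars.isspace x)
          = (rest.dropWhile (fun x => !pvIsSep x)).map pvCommaF := by
        rw [List.dropWhile_map, hfe]
      have hall : ∀ x ∈ c :: rest.takeWhile (fun x => !pvIsSep x),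
          PySem.Chars.isspace x = false := by
        intro x hx
        rcases List.mem_cons.mp hx with h | h
        · subst h; exact pv_nonsep_nonspace hcb
        · exact pv_nonsep_nonspace (by simpa using List.mem_takeWhile_imp h)
      have hns : ¬ (PySem.Chars.isspace c = true) := by
        simp [pv_nonsep_nonspace hcb]
      rw [pvScanB]
      simp only [hc, Bool.false_eq_true, if_false]
      rw [List.map_cons, hcs, pvWords, if_neg hns, htk, hdw]
      simp only [pvLoopC, pv_strip_nonspace hall]
      split_ifs with h
      · rw [pv_strip_nonspace (fun x hx => hall x (List.mem_of_mem_drop hx))]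
      · exact ih _ (by have := List.length_dropWhile_le (fun x => !pvIsSep x) rest; simp; omega) _ rfl

-- ===== VERDICT (by name: the statement is the Claim_ definition above) =====
theorem extract_token_py_spec : Claim_equal_extract_token_py := by
  intro query prefix_ _
  unfold Spec_extract_token_py extract_token_py extract_token_py_alt
  by_cases hq : query = ""
  · simp [hq]
  · simp only [hq, ite_false]
    rw [pv_loopA_eq_loopC, PySem.Str.split₀_map_toList]
    have hrep : (PySem.Str.replace (PySem.Str.lower query) "," " ").toList
        = (PySem.Chars.lower query.toList).map pvCommaF := by
      rw [PySem.Str.toList_replace, PySem.Str.toList_lower]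
      exact pv_replace_comma _
    rw [hrep, pv_split₀_eq_words, PySem.Str.toList_lower, ← pv_scan_eq]
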